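-- pv_equiv track=rewrite | github.com/VasiliiOptimist/IS_project | preproccessing.py | create_new_values
-- ===== SOURCE A (Python) =====
-- def create_new_values(counted_values):
--     d = dict([ (k, []) for k in range(1, 20)])
--     for el in counted_values:
--         if 1 <= counted_values[el] < 20:
--             d[counted_values[el]] += [el]
--     zeros = []
--     for key in d:
--         if len(d[key]) == 0:
--             zeros.append(key)
--     for z in zeros:
--         d.pop(z, None)
--     return d
-- ===== SOURCE B (Python) =====
-- def create_new_values(counted_values):
--     result = {}
--     for k in range(1, 20):
--         bucket = [el for el, c in counted_values.items() if c == k]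
--         if bucket:
--             result[k] = bucket
--     return result
-- ===== Notes on version B (the rewrite author's own statement) =====
-- stated objective: simpler
-- what changed: B is output-driven: it loops over the 19 possible count values and collects each bucket with one comprehension scan of the input per count, inserting only non-empty buckets; A's single inversion pass into 19 preallocated buckets and its two-stage empty-bucket pruning are gone.
import Mathlib
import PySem

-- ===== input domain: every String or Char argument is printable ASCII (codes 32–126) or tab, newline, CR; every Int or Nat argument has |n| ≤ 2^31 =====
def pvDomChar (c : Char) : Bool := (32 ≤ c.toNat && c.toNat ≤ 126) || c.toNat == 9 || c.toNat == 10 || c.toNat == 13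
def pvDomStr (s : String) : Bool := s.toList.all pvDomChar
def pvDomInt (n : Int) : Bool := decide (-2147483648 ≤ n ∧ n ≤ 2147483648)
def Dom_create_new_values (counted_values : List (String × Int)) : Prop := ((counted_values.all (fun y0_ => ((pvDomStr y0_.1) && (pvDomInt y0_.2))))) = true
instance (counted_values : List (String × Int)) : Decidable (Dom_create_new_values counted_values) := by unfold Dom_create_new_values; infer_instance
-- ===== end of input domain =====

-- B replaces A's invert-into-19-preallocated-buckets-then-prune pass by an output-driven
-- loop: one scan of the input per possible count 1..19, inserting only non-empty buckets
-- (objective: simpler; same linear cost).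


-- ===== PORT A =====
-- literal port of A: d = all buckets 1..19, fill by iterating the dict's keys and
-- looking each key up, collect the empty buckets, pop them, return the dict's items.
def create_new_values (counted_values : List (String × Int)) : List (Int × List String) :=
  let cv : PySem.Dict String Int := PySem.Dict.mk counted_values
  -- d = dict([(k, []) for k in range(1, 20)])
  let d : PySem.Dict Int (List String) :=
    PySem.Dict.ofList ((PySem.List.pyRange 1 20 1).map (fun k => (k, ([] : List String))))
  -- for el in counted_values: if 1 <= counted_values[el] < 20: d[counted_values[el]] += [el]
  -- (the guard guarantees the key is present, so 'd[c] += [el]' is exactly Dict.modify)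
  let d := cv.keys.foldl (fun d el =>
    let c := cv.getD el 0
    if 1 ≤ c ∧ c < 20 then d.modify c [] (· ++ [el]) else d) d
  -- zeros = []; for key in d: if len(d[key]) == 0: zeros.append(key)
  let zeros := d.keys.foldl (fun zs key =>
    if (d.getD key []).length = 0 then zs ++ [key] else zs) ([] : List Int)
  -- for z in zeros: d.pop(z, None)
  let d := zeros.foldl (fun d z => d.erase z) d
  d.items

-- ===== PORT B =====
-- port of B: for k in range(1,20): bucket = [el for el, c in counted_values.items() if c == k];
-- if bucket: result[k] = bucket — one filter+map scan of the input per count.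
def create_new_values_alt (counted_values : List (String × Int)) : List (Int × List String) :=
  let result : PySem.Dict Int (List String) :=
    (PySem.List.pyRange 1 20 1).foldl (fun r k =>
      let bucket := (counted_values.filter (fun p => p.2 == k)).map Prod.fst
      if bucket ≠ [] then r.insert k bucket else r) PySem.Dict.empty
  result.items

-- ===== PRECONDITION & SPEC =====
-- Pre_ only requires pairwise-distinct keys: the Python argument is a dict, so an
-- association list with a repeated key does not represent any actual input of A.
def Pre_create_new_values (counted_values : List (String × Int)) : Prop :=
  (counted_values.map Prod.fst).Nodup
instance (counted_values : List (String × Int)) : Decidable (Pre_create_new_values counted_values) := by unfold Pre_create_new_values; infer_instance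
def pvWitness_create_new_values : (List (String × Int)) := [("a", 2), ("b", 2), ("c", 0)]
def Spec_create_new_values (counted_values : List (String × Int)) (out : List (Int × List String)) : Prop := out = create_new_values_alt counted_values
instance (counted_values : List (String × Int)) (out : List (Int × List String)) : Decidable (Spec_create_new_values counted_values out) := by unfold Spec_create_new_values; infer_instance

-- ===== CLAIM (what is proved, stated in full; the proofs are below) =====
def Claim_equal_create_new_values : Prop := ∀ (counted_values : List (String × Int)), Dom_create_new_values counted_values → Pre_create_new_values counted_values → Spec_create_new_values counted_values (create_new_values counted_values)

-- ===== LEMMAS AND PROOFS =====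

def pvFiltered (cvs : List (String × Int)) : List (String × Int) :=
  cvs.filter (fun p => decide (1 ≤ p.2 ∧ p.2 < 20))

def pvBucket (cvs : List (String × Int)) (c : Int) : List String :=
  ((pvFiltered cvs).filter (fun p => p.2 == c)).map (fun p => p.1)

theorem fill_getD (cvs : List (String × Int)) (d : PySem.Dict Int (List String)) (c : Int) :
    (cvs.foldl (fun d p => if 1 ≤ p.2 ∧ p.2 < 20 then d.modify p.2 [] (· ++ [p.1]) else d) d).getD c []
      = d.getD c [] ++ pvBucket cvs c := by
  unfold pvBucket pvFiltered
  rw [PySem.List.foldl_ite_eq_foldl_filter]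
  have key := PySem.Dict.getD_foldl_modify_append
    ((cvs.filter (fun x => decide (1 ≤ x.2 ∧ x.2 < 20))).map Prod.swap) d c
  rw [List.foldl_map] at key
  simp only [Prod.fst_swap, Prod.snd_swap] at key
  rw [key]
  simp [List.filter_map, List.map_map, Function.comp]

theorem fill_keys (cvs : List (String × Int)) (d : PySem.Dict Int (List String)) :
    (cvs.foldl (fun d p => if 1 ≤ p.2 ∧ p.2 < 20 then d.modify p.2 [] (· ++ [p.1]) else d) d).keys
      = PySem.Set.update d.keys ((pvFiltered cvs).map Prod.snd) := by
  unfold pvFiltered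
  rw [PySem.List.foldl_ite_eq_foldl_filter]
  exact PySem.Dict.keys_foldl_modify_key _ (fun p : String × Int => p.2) _ (fun d p v => v ++ [p.1]) d

theorem set_update_of_mem {α : Type} [BEq α] [LawfulBEq α] (l : List α) (s : PySem.Set α)
    (h : ∀ x ∈ l, x ∈ s) : PySem.Set.update s l = s := by
  induction l generalizing s with
  | nil => rfl
  | cons x t ih =>
      have hx : PySem.Set.add s x = s := by
        simp [PySem.Set.add, PySem.Set.contains, h x (by simp)]
      show List.foldl PySem.Set.add (PySem.Set.add s x) t = s
      rw [hx]
      exact ih s fun y hy => h y (by simp [hy])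

theorem erase_foldl_items (zs : List Int) (d : PySem.Dict Int (List String)) :
    (zs.foldl (fun d z => d.erase z) d).items = d.items.filter (fun p => decide (p.1 ∉ zs)) := by
  induction zs generalizing d with
  | nil => simp
  | cons z t ih =>
      rw [List.foldl_cons, ih]
      have he : (d.erase z).items = d.items.filter (fun p => !p.1 == z) := rfl
      rw [he, List.filter_filter]
      apply List.filter_congr
      intro p hp
      by_cases hz : p.1 = z <;> simp [hz]

-- the canonical value both ports compute
def pvD0 : PySem.Dict Int (List String) :=
  PySem.Dict.ofList ((PySem.List.pyRange 1 20 1).map (fun k => (k, ([] : List String))))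

def pvTail (d : PySem.Dict Int (List String)) : List (Int × List String) :=
  ((d.keys.foldl (fun zs key => if (d.getD key []).length = 0 then zs ++ [key] else zs)
      ([] : List Int)).foldl (fun d z => d.erase z) d).items

theorem pvD0_getD (k : Int) : pvD0.getD k [] = [] := by
  rcases h : pvD0.get? k with _ | v
  · rw [PySem.Dict.getD_eq_get?_getD, h]; rfl
  · have hm := PySem.Dict.mem_items_of_get?_eq_some _ h
    have hv : v ∈ pvD0.values := List.mem_map_of_mem hm
    have : pvD0.values = List.replicate 19 [] := by decide
    rw [this] at hv
    rw [PySem.Dict.getD_eq_get?_getD, h, List.eq_of_mem_replicate hv]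
    rfl

theorem tailA (cvs : List (String × Int)) (d : PySem.Dict Int (List String))
    (hkeys : d.keys = PySem.List.pyRange 1 20 1)
    (hget : ∀ k, d.getD k [] = pvBucket cvs k) :
    pvTail d = ((PySem.List.pyRange 1 20 1).filter (fun k => decide (pvBucket cvs k ≠ []))).map
      (fun k => (k, pvBucket cvs k)) := by
  unfold pvTail
  have hnd : d.keys.Nodup := by rw [hkeys]; decide
  rw [PySem.List.foldl_append_ite_eq_filter (fun key => (d.getD key []).length = 0) d.keys []]
  rw [List.nil_append, erase_foldl_items, PySem.Dict.items_eq_map_keys d hnd [], List.filter_map]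
  rw [hkeys]
  have hmem : ∀ k : Int, k ∈ PySem.List.pyRange 1 20 1 →
      (decide (k ∉ List.filter (fun x => decide ((d.getD x []).length = 0)) (PySem.List.pyRange 1 20 1))
        = decide (pvBucket cvs k ≠ [])) := by
    intro k hk
    simp only [decide_eq_decide, List.mem_filter, decide_eq_true_eq, hget]
    rw [List.length_eq_zero_iff]
    simp [hk]
  simp only [Function.comp_def]
  rw [List.filter_congr (q := fun k : Int => decide (pvBucket cvs k ≠ []))
      (fun k hk => by simpa using hmem k hk)]
  exact List.map_congr_left (fun k _ => by rw [hget])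


theorem a_canonical (cvs : List (String × Int)) (hpre : (cvs.map Prod.fst).Nodup) :
    create_new_values cvs
      = ((PySem.List.pyRange 1 20 1).filter (fun k => decide (pvBucket cvs k ≠ []))).map
          (fun k => (k, pvBucket cvs k)) := by
  have hnd : (PySem.Dict.mk cvs).keys.Nodup := hpre
  -- the fill loop over the dict's keys is the fill loop over its pairs
  have hfold : (PySem.Dict.mk cvs).keys.foldl (fun d el =>
        let c := (PySem.Dict.mk cvs).getD el 0
        if 1 ≤ c ∧ c < 20 then d.modify c [] (· ++ [el]) else d)
        pvD0
      = cvs.foldl (fun d p => if 1 ≤ p.2 ∧ p.2 < 20 then d.modify p.2 [] (· ++ [p.1]) else d)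
        pvD0 := by
    rw [show (PySem.Dict.mk cvs).keys = cvs.map Prod.fst from rfl, List.foldl_map]
    apply PySem.List.foldl_congr_mem
    intro d p hp
    have hgd : (PySem.Dict.mk cvs).getD p.1 0 = p.2 :=
      PySem.Dict.getD_of_mem_items (PySem.Dict.mk cvs) (by exact hp) hnd 0
    simp only [hgd]
  rw [show create_new_values cvs = pvTail ((PySem.Dict.mk cvs).keys.foldl (fun d el =>
      let c := (PySem.Dict.mk cvs).getD el 0
      if 1 ≤ c ∧ c < 20 then d.modify c [] (· ++ [el]) else d) pvD0) from rfl]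
  rw [hfold]
  refine tailA cvs _ ?_ ?_
  · rw [fill_keys]
    have hsub : ∀ x ∈ (pvFiltered cvs).map Prod.snd, x ∈ pvD0.keys := by
      intro x hx
      simp only [pvFiltered, List.mem_map, List.mem_filter, decide_eq_true_eq] at hx
      obtain ⟨p, ⟨_, h1, h2⟩, rfl⟩ := hx
      rw [show pvD0.keys = PySem.List.pyRange 1 20 1 from by decide]
      exact PySem.List.mem_pyRange_one.mpr ⟨h1, h2⟩
    rw [set_update_of_mem _ _ hsub]
    decide
  · intro k
    rw [fill_getD, pvD0_getD]
    simp

-- B's per-count scan of the raw input equals pvBucket for every in-range count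
theorem bucket_eq (cvs : List (String × Int)) (k : Int) (hk : k ∈ PySem.List.pyRange 1 20 1) :
    (cvs.filter (fun p => p.2 == k)).map Prod.fst = pvBucket cvs k := by
  obtain ⟨h1, h2⟩ := PySem.List.mem_pyRange_one.mp hk
  unfold pvBucket pvFiltered
  rw [List.filter_filter]
  have hpt : ∀ p : String × Int, p ∈ cvs →
      ((p.2 == k) : Bool) = ((p.2 == k) && decide (1 ≤ p.2 ∧ p.2 < 20)) := by
    intro p _
    by_cases h : p.2 = k
    · simp [h]; omega
    · simp [h]
  rw [List.filter_congr hpt]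

theorem alt_canonical (cvs : List (String × Int)) :
    create_new_values_alt cvs
      = ((PySem.List.pyRange 1 20 1).filter (fun k => decide (pvBucket cvs k ≠ []))).map
          (fun k => (k, pvBucket cvs k)) := by
  show ((PySem.List.pyRange 1 20 1).foldl (fun r k =>
      if ((cvs.filter (fun p => p.2 == k)).map Prod.fst) ≠ [] then
        r.insert k ((cvs.filter (fun p => p.2 == k)).map Prod.fst) else r)
      PySem.Dict.empty).items = _
  rw [PySem.List.foldl_ite_eq_foldl_filter]
  have hnodup : (((PySem.List.pyRange 1 20 1).filter
      (fun k => decide (((cvs.filter (fun p => p.2 == k)).map Prod.fst) ≠ []))).map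
      (fun a : Int => a)).Nodup := by
    simpa using List.Nodup.filter _ (by decide : (PySem.List.pyRange 1 20 1).Nodup)
  have h := PySem.Dict.items_foldl_insert_fresh
    ((PySem.List.pyRange 1 20 1).filter
      (fun k => decide (((cvs.filter (fun p => p.2 == k)).map Prod.fst) ≠ [])))
    (fun a : Int => a) (fun a => (cvs.filter (fun p => p.2 == a)).map Prod.fst)
    PySem.Dict.empty (fun a _ => rfl) hnodup
  simp only at h
  rw [h]
  have hfil : (PySem.List.pyRange 1 20 1).filter
        (fun k => decide (((cvs.filter (fun p => p.2 == k)).map Prod.fst) ≠ []))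
      = (PySem.List.pyRange 1 20 1).filter (fun k => decide (pvBucket cvs k ≠ [])) :=
    List.filter_congr (fun k hk => by rw [bucket_eq cvs k hk])
  rw [hfil]
  refine (List.nil_append _).trans (List.map_congr_left ?_)
  intro k hk
  rw [bucket_eq cvs k (List.mem_of_mem_filter hk)]

-- ===== VERDICT (by name: the statement is the Claim_ definition above) =====
theorem create_new_values_spec : Claim_equal_create_new_values := by
  intro cvs _ hpre
  exact (a_canonical cvs hpre).trans (alt_canonical cvs).symm
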